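-- pv_equiv track=rewrite | github.com/Kumamoto-Hamachi/atcoder_pr | others/abc_selection/joi_6_main/c/c_fault.py | calc_square
-- ===== SOURCE A (Python) =====
-- def calc_square(torio):
--     area_candidates = [None] * 3
--     for i in range(3):
--         area_candidates[i] = torio[i][0] ** 2 + torio[i][1] ** 2
--     area_candidates.sort()
--     if area_candidates[0] == area_candidates[1]:
--         return area_candidates[0]
--     else:
--         return area_candidates[1]
-- ===== SOURCE B (Python) =====
-- def calc_square(torio):
--     # one pass: running sum, min and max of the squared norms; median = sum - min - max
--     total = 0
--     mn = None
--     mx = None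
--     for p in torio[:3]:
--         v = p[0] ** 2 + p[1] ** 2
--         total += v
--         if mn is None or v < mn:
--             mn = v
--         if mx is None or v > mx:
--             mx = v
--     return total - mn - mx
-- ===== Notes on version B (the rewrite author's own statement) =====
-- stated objective: simpler
-- what changed: B does a single accumulator pass over the three points keeping running sum, min and max of the squared norms and returns sum - min - max (the median), instead of building a list, sorting it and indexing through a redundant equality branch.
import Mathlib
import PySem

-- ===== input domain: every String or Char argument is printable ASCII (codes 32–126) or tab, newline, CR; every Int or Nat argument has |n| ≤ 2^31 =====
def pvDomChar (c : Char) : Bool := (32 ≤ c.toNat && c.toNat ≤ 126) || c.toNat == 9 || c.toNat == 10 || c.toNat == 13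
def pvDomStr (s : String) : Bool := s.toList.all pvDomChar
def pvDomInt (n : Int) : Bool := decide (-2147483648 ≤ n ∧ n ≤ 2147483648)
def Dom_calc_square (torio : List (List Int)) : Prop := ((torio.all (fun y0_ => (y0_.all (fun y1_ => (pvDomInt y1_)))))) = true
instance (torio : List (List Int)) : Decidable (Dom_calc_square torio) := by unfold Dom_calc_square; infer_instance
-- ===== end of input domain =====

-- B replaces A's build-list/sort/index-with-equality-branch by a single accumulator pass (running sum, min, max over the three squared norms) returning sum - min - max; objective: simpler.

-- ===== PORT A =====
def calc_square (torio : List (List Int)) : Int :=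
  -- area_candidates[i] = torio[i][0] ** 2 + torio[i][1] ** 2 ; pyGetD is exact under Pre_
  let cand : Int → Int := fun i =>
    (PySem.List.pyGetD (PySem.List.pyGetD torio i []) 0 0) ^ 2 +
    (PySem.List.pyGetD (PySem.List.pyGetD torio i []) 1 0) ^ 2
  let area_candidates : List Int := [cand 0, cand 1, cand 2]
  let sorted := PySem.List.sorted area_candidates (fun x => x) false
  if PySem.List.pyGetD sorted 0 0 = PySem.List.pyGetD sorted 1 0 then
    PySem.List.pyGetD sorted 0 0
  else
    PySem.List.pyGetD sorted 1 0

-- ===== PORT B =====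
-- loop body: accumulate (total, mn, mx); 'mn is None or v < mn' short-circuits, so getD is only read when mn ≠ none
def calcSquareStep (acc : Int × Option Int × Option Int) (v : Int) : Int × Option Int × Option Int :=
  (acc.1 + v,
   if acc.2.1 = none ∨ v < acc.2.1.getD 0 then some v else acc.2.1,
   if acc.2.2 = none ∨ acc.2.2.getD 0 < v then some v else acc.2.2)

-- single pass over torio[:3] accumulating (total, mn, mx); returns total - mn - mx
def calc_square_alt (torio : List (List Int)) : Int :=
  let st :=
    (PySem.List.slice torio none (some 3)).foldl
      (fun acc p =>
        calcSquareStep acc ((PySem.List.pyGetD p 0 0) ^ 2 + (PySem.List.pyGetD p 1 0) ^ 2))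
      (0, none, none)
  st.1 - st.2.1.getD 0 - st.2.2.getD 0

-- ===== PRECONDITION & SPEC =====
-- Pre_ excludes exactly the inputs where A raises IndexError: fewer than 3 points, or one of the first 3 rows shorter than 2.
def Pre_calc_square (torio : List (List Int)) : Prop :=
  3 ≤ torio.length ∧ ∀ r ∈ torio.take 3, 2 ≤ r.length
instance (torio : List (List Int)) : Decidable (Pre_calc_square torio) := by unfold Pre_calc_square; infer_instance
def pvWitness_calc_square : List (List Int) := [[0, 0], [3, 0], [0, 4]]
def Spec_calc_square (torio : List (List Int)) (out : Int) : Prop := out = calc_square_alt torio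
instance (torio : List (List Int)) (out : Int) : Decidable (Spec_calc_square torio out) := by unfold Spec_calc_square; infer_instance

-- ===== CLAIM (what is proved, stated in full; the proofs are below) =====
def Claim_equal_calc_square : Prop := ∀ (torio : List (List Int)), Dom_calc_square torio → Pre_calc_square torio → Spec_calc_square torio (calc_square torio)

-- ===== LEMMAS AND PROOFS =====

theorem getD1 {α : Type} (x y : α) (t : List α) (d : α) :
    PySem.List.pyGetD (x :: y :: t) 1 d = y := by
  simp [PySem.List.pyGetD, PySem.List.pyGet?, PySem.List.pyIdx?]

theorem getD2 {α : Type} (x y z : α) (t : List α) (d : α) :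
    PySem.List.pyGetD (x :: y :: z :: t) 2 d = z := by
  simp [PySem.List.pyGetD, PySem.List.pyGet?, PySem.List.pyIdx?]
  rw [if_pos (by omega)]
  simp

-- median of three: A's sort-then-index equals (a+b+c) - min - max of the three
set_option maxHeartbeats 1600000 in
theorem med3 (a b c : Int) :
    (let s := PySem.List.sorted [a, b, c] (fun x => x) false
     if PySem.List.pyGetD s 0 0 = PySem.List.pyGetD s 1 0 then PySem.List.pyGetD s 0 0
     else PySem.List.pyGetD s 1 0) =
    a + b + c - min a (min b c) - max a (max b c) := by
  simp only [PySem.List.sorted, List.foldl, PySem.List.insertBy]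
  split_ifs <;>
    simp_all [PySem.List.insertBy, PySem.List.pyGetD, PySem.List.pyGet?, PySem.List.pyIdx?,
      min_def, max_def] <;>
    split_ifs <;> simp_all <;> omega

-- B's fold over three values computes sum - min - max
set_option maxHeartbeats 800000 in
theorem bfold3 (a b c : Int) :
    (calcSquareStep (calcSquareStep (calcSquareStep (0, none, none) a) b) c).1
      - (calcSquareStep (calcSquareStep (calcSquareStep (0, none, none) a) b) c).2.1.getD 0
      - (calcSquareStep (calcSquareStep (calcSquareStep (0, none, none) a) b) c).2.2.getD 0
    = a + b + c - min a (min b c) - max a (max b c) := by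
  simp only [calcSquareStep, min_def, max_def]
  norm_num
  split_ifs <;> simp_all <;> omega

-- ===== VERDICT (by name: the statement is the Claim_ definition above) =====
set_option maxHeartbeats 1600000 in
theorem calc_square_spec : Claim_equal_calc_square := by
  intro torio _ hpre
  obtain ⟨hlen, hrows⟩ := hpre
  rcases torio with _ | ⟨r0, _ | ⟨r1, _ | ⟨r2, rest⟩⟩⟩ <;> simp at hlen
  have h0 : 2 ≤ r0.length := hrows r0 (by simp)
  have h1 : 2 ≤ r1.length := hrows r1 (by simp)
  have h2 : 2 ≤ r2.length := hrows r2 (by simp)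
  rcases r0 with _ | ⟨x0, _ | ⟨y0, t0⟩⟩ <;> simp at h0
  rcases r1 with _ | ⟨x1, _ | ⟨y1, t1⟩⟩ <;> simp at h1
  rcases r2 with _ | ⟨x2, _ | ⟨y2, t2⟩⟩ <;> simp at h2
  show calc_square _ = calc_square_alt _
  unfold calc_square calc_square_alt
  simp only [PySem.List.pyGetD_zero_cons, getD1, getD2]
  rw [med3, show (3:Int) = ((3:Nat):Int) from rfl, PySem.List.slice_to_natCast,
    show List.take 3 ((x0::y0::t0)::(x1::y1::t1)::(x2::y2::t2)::rest)
       = [x0::y0::t0, x1::y1::t1, x2::y2::t2] from rfl]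
  simp only [List.foldl, PySem.List.pyGetD_zero_cons, getD1]
  rw [bfold3]
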